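-- pv_equiv track=rewrite | github.com/hydroArgentum/DailyProgrammer386 | 386.py | sign_rotation_list
-- ===== SOURCE A (Python) =====
-- def sign_rotation_list(list_length):
--     # Need to keep track of the order of the signs for each recursion.
--     sign_list = [1]
--     index = 1
--     sign = 1
--     while index < list_length:
--         sign_list.append(sign_list[index - 1] * sign)
--         sign *= -1
--         index += 1
--     return sign_list
-- ===== SOURCE B (Python) =====
-- def sign_rotation_list(list_length):
--     result = [1]
--     for i in range(1, list_length):
--         result.append(1 if i % 4 < 2 else -1)
--     return result
-- ===== Notes on version B (the rewrite author's own statement) =====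
-- stated objective: simpler
-- what changed: Replaces A's stateful recurrence (previous element times a flipping sign, re-read from the growing list each step) with a stateless closed-form per-index formula: element i is 1 if i%4<2 else -1.
import Mathlib
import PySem

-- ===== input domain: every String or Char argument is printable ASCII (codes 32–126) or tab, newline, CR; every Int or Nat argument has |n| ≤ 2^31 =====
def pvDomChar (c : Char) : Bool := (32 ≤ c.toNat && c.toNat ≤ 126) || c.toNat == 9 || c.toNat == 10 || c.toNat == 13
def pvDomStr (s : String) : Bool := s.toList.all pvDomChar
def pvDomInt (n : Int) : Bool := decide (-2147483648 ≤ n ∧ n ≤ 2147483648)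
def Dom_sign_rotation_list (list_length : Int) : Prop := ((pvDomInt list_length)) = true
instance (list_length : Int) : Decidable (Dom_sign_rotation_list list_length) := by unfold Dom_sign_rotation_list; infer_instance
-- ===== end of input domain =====

-- B replaces A's stateful flipping-sign recurrence with the stateless closed-form
-- per-index formula 1 if i%4<2 else -1 (objective: simpler).

-- ===== PORT A =====
-- while loop of A: state (sign_list, index, sign)
def srlLoop (list_length : Int) (sign_list : List Int) (index sign : Int) : List Int :=
  if _h : index < list_length then
    srlLoop list_length (sign_list ++ [PySem.List.pyGetD sign_list (index - 1) 0 * sign])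
      (index + 1) (sign * -1)
  else sign_list
termination_by (list_length - index).toNat
decreasing_by omega

def sign_rotation_list (list_length : Int) : List Int :=
  srlLoop list_length [1] 1 1

-- ===== PORT B =====
def sign_rotation_list_alt (list_length : Int) : List Int :=
  (PySem.List.pyRange 1 list_length 1).foldl
    (fun acc i => acc ++ [if PySem.Int.mod i 4 < 2 then 1 else -1]) [1]

-- ===== PRECONDITION & SPEC =====
def Spec_sign_rotation_list (list_length : Int) (out : List Int) : Prop := out = sign_rotation_list_alt list_length
instance (list_length : Int) (out : List Int) : Decidable (Spec_sign_rotation_list list_length out) := by unfold Spec_sign_rotation_list; infer_instance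

-- ===== CLAIM (what is proved, stated in full; the proofs are below) =====
def Claim_equal_sign_rotation_list : Prop := ∀ (list_length : Int), Dom_sign_rotation_list list_length → Spec_sign_rotation_list list_length (sign_rotation_list list_length)

-- ===== LEMMAS AND PROOFS =====

-- the period-4 pattern B computes per index
def srlPat (i : Int) : Int := if PySem.Int.mod i 4 < 2 then 1 else -1

-- the full output list for bound n
def srlFull (n : Int) : List Int := [1] ++ (PySem.List.pyRange 1 n 1).map srlPat

-- the flipping sign as a function of the index
def srlSgn (k : Int) : Int := if k % 2 = 1 then 1 else -1

theorem srlFull_alt (n : Int) : sign_rotation_list_alt n = srlFull n := by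
  unfold sign_rotation_list_alt srlFull srlPat
  rw [PySem.List.foldl_append_singleton_eq_map]

theorem srlFull_succ (k : Int) (hk : 1 ≤ k) :
    srlFull (k + 1) = srlFull k ++ [srlPat k] := by
  simp [srlFull, PySem.List.pyRange_one_succ_right hk]

theorem srlFull_eq_range_zero (k : Int) (hk : 1 ≤ k) :
    srlFull k = (PySem.List.pyRange 0 k 1).map srlPat := by
  rw [PySem.List.pyRange_one_cons (by omega : (0:Int) < k)]
  simp [srlFull, srlPat, PySem.Int.mod]

theorem srlGet (k : Int) (hk : 1 ≤ k) :
    PySem.List.pyGetD (srlFull k) (k - 1) 0 = srlPat (k - 1) := by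
  rw [srlFull_eq_range_zero k hk]
  exact PySem.List.pyGetD_map_pyRange_of_nonneg srlPat k (k - 1) 0 (by omega) (by omega)

theorem srlPat_step (k : Int) (_hk : 1 ≤ k) :
    srlPat (k - 1) * srlSgn k = srlPat k := by
  unfold srlPat srlSgn
  rw [PySem.Int.mod_eq_emod_of_pos (by norm_num : (0:Int) < 4)]
  rw [PySem.Int.mod_eq_emod_of_pos (by norm_num : (0:Int) < 4)]
  split_ifs <;> omega

theorem srlSgn_step (k : Int) : srlSgn k * -1 = srlSgn (k + 1) := by
  unfold srlSgn
  split_ifs <;> first | rfl | omega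

theorem srlLoop_inv (m : Nat) : ∀ (n k : Int), 1 ≤ k → (n - k).toNat = m →
    srlLoop n (srlFull k) k (srlSgn k) = srlFull (max n k) := by
  induction m with
  | zero =>
    intro n k hk hm
    rw [srlLoop]
    have hnk : n ≤ k := by omega
    simp [hnk]
  | succ m ih =>
    intro n k hk hm
    rw [srlLoop]
    have hkn : k < n := by omega
    rw [dif_pos hkn, srlGet k hk, srlPat_step k hk, srlSgn_step k,
        ← srlFull_succ k hk, ih n (k + 1) (by omega) (by omega)]
    congr 1
    omega

-- ===== VERDICT (by name: the statement is the Claim_ definition above) =====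
theorem sign_rotation_list_spec : Claim_equal_sign_rotation_list := by
  intro n _
  unfold Spec_sign_rotation_list
  rw [srlFull_alt]
  have h1 : srlFull 1 = [1] := by
    simp [srlFull, PySem.List.pyRange_one_eq_nil (by omega : (1:Int) ≤ 1)]
  have h := srlLoop_inv (n - 1).toNat n 1 (by omega) rfl
  rw [h1] at h
  have hsgn : srlSgn 1 = 1 := by decide
  rw [hsgn] at h
  unfold sign_rotation_list
  rw [h]
  by_cases hn : n ≤ 1
  · rw [max_eq_right hn]
    simp [srlFull, PySem.List.pyRange_one_eq_nil hn, PySem.List.pyRange_one_eq_nil (le_refl (1:Int))]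
  · rw [max_eq_left (by omega : (1:Int) ≤ n)]
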